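-- pv_equiv track=rewrite | github.com/pylint-dev/pylint | tests/functional/ext/for_any_all/for_any_all.py | with_elif
-- ===== SOURCE A (Python) =====
-- def with_elif(split_lines, max_chars):
--     """
--     Do not raise consider-using-any-or-all because the intent in this code
--     is to iterate over all the lines (not short-circuit) and see what
--     the last value would be.
--     """
--     last_longest_line = False
--     for line in split_lines:
--         if len(line) > max_chars:
--             last_longest_line = True
--         elif len(line) == max_chars:
--             last_longest_line = False
--     return last_longest_line
-- ===== SOURCE B (Python) =====
-- def with_elif(split_lines, max_chars):
--     for line in reversed(split_lines):
--         if len(line) >= max_chars: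
--             return len(line) > max_chars
--     return False
-- ===== Notes on version B (the rewrite author's own statement) =====
-- stated objective: simpler
-- what changed: Replaces the forward accumulate-the-last-decision pass with a reverse early-exit scan that returns on the first (i.e. last) line whose length reaches max_chars.
import Mathlib
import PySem

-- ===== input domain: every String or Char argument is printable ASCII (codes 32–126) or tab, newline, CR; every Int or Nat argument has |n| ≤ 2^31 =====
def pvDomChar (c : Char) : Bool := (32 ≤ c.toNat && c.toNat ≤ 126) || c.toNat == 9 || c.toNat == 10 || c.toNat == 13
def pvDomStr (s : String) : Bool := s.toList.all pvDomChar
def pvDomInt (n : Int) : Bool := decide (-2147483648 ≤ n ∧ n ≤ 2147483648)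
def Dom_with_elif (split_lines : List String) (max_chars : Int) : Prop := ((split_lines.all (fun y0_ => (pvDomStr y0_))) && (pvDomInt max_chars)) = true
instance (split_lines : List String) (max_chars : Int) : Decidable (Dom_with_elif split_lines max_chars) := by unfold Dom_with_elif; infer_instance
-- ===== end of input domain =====

-- B replaces A's forward accumulate-the-last-decision pass with a reverse early-exit scan (simpler).

-- ===== PORT A =====
def with_elif (split_lines : List String) (max_chars : Int) : Bool :=
  split_lines.foldl
    (fun last_longest_line line =>
      if PySem.Str.len line > max_chars then true
      else if PySem.Str.len line = max_chars then false
      else last_longest_line)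
    false

-- ===== PORT B =====
def with_elif_alt_go (max_chars : Int) : List String → Bool
  | [] => false
  | line :: rest =>
      if PySem.Str.len line ≥ max_chars then PySem.Str.len line > max_chars
      else with_elif_alt_go max_chars rest

def with_elif_alt (split_lines : List String) (max_chars : Int) : Bool :=
  with_elif_alt_go max_chars split_lines.reverse

-- ===== PRECONDITION & SPEC =====
def Spec_with_elif (split_lines : List String) (max_chars : Int) (out : Bool) : Prop := out = with_elif_alt split_lines max_chars
instance (split_lines : List String) (max_chars : Int) (out : Bool) : Decidable (Spec_with_elif split_lines max_chars out) := by unfold Spec_with_elif; infer_instance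

-- ===== CLAIM (what is proved, stated in full; the proofs are below) =====
def Claim_equal_with_elif : Prop := ∀ (split_lines : List String) (max_chars : Int), Dom_with_elif split_lines max_chars → Spec_with_elif split_lines max_chars (with_elif split_lines max_chars)

-- ===== LEMMAS AND PROOFS =====

theorem with_elif_eq_go (max_chars : Int) (split_lines : List String) :
    with_elif split_lines max_chars = with_elif_alt_go max_chars split_lines.reverse := by
  induction split_lines using List.reverseRecOn with
  | nil => rfl
  | append_singleton xs x ih =>
      simp only [with_elif, List.foldl_append, List.foldl_cons, List.foldl_nil,
        List.reverse_append, List.reverse_cons, List.reverse_nil, List.nil_append,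
        List.cons_append, with_elif_alt_go]
      by_cases h1 : max_chars < (x.length : Int)
      · simp [h1, le_of_lt h1]
      · by_cases h2 : ((x.length : Int) = max_chars)
        · simp [h2]
        · have h3 : ¬ max_chars ≤ (x.length : Int) := by omega
          simpa [h1, h2, h3, with_elif] using ih

-- ===== VERDICT (by name: the statement is the Claim_ definition above) =====
theorem with_elif_spec : Claim_equal_with_elif := by
  intro split_lines max_chars _
  exact with_elif_eq_go max_chars split_lines
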